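-- pv_equiv track=rewrite | github.com/doocs/leetcode | solution/3700-3799/3755.Find Maximum Balanced XOR Subarray Length/Solution.py | maxBalancedSubarray
-- ===== SOURCE A (Python) =====
-- from typing import List
--
-- def maxBalancedSubarray(nums: List[int]) -> int:
--     d = {(0, 0): -1}
--     a = b = 0
--     ans = 0
--     for i, x in enumerate(nums):
--         a ^= x
--         b += 1 if x % 2 == 0 else -1
--         if (a, b) in d:
--             ans = max(ans, i - d[(a, b)])
--         else:
--             d[(a, b)] = i
--     return ans
-- ===== SOURCE B (Python) =====
-- from typing import List
--
-- def maxBalancedSubarray(nums: List[int]) -> int: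
--     ans = 0
--     for i in range(len(nums)):
--         a = b = 0
--         for j, x in enumerate(nums[i:], i):
--             a ^= x
--             b += 1 if x % 2 == 0 else -1
--             if a == 0 and b == 0:
--                 ans = max(ans, j - i + 1)
--     return ans
-- ===== Notes on version B (the rewrite author's own statement) =====
-- stated objective: alternative
-- what changed: Replaces the single-pass first-occurrence hashmap over prefix (xor, parity-balance) states with a direct brute-force enumeration of all subarrays: for each start index, rescan the suffix maintaining a running xor and balance and record the length whenever both are zero.
import Mathlib
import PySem

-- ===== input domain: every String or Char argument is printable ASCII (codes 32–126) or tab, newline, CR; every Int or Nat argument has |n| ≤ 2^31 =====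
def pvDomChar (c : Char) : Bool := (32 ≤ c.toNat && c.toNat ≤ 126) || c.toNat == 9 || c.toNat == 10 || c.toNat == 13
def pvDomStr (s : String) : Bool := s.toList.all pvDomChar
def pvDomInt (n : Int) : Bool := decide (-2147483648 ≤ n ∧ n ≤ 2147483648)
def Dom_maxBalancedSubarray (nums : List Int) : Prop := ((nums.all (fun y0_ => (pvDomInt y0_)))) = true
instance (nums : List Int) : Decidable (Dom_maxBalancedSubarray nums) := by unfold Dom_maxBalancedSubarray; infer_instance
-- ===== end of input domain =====

-- B replaces A's single-pass first-occurrence hashmap over prefix (xor, balance) states by a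
-- brute-force enumeration of all subarrays (alternative algorithm, same return value; not faster).

-- ===== PORT A =====
-- loop body of A's single pass: state = (d, a, b, ans)
def pvAStep (st : PySem.Dict (Int × Int) Int × Int × Int × Int) (p : Int × Int) :
    PySem.Dict (Int × Int) Int × Int × Int × Int :=
  let a := PySem.Int.bxor st.2.1 p.2
  let b := st.2.2.1 + (if PySem.Int.mod p.2 2 = 0 then 1 else -1)
  if st.1.contains (a, b) then
    (st.1, a, b, max st.2.2.2 (p.1 - st.1.getD (a, b) 0))
  else
    (st.1.insert (a, b) p.1, a, b, st.2.2.2)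

def maxBalancedSubarray (nums : List Int) : Int :=
  ((PySem.List.enumerate nums 0).foldl pvAStep
    (PySem.Dict.empty.insert (0, 0) (-1), 0, 0, 0)).2.2.2

-- ===== PORT B =====
-- loop body of B's inner scan from start index i: state = (a, b, ans)
def pvBInner (i : Int) (st : Int × Int × Int) (p : Int × Int) : Int × Int × Int :=
  let a := PySem.Int.bxor st.1 p.2
  let b := st.2.1 + (if PySem.Int.mod p.2 2 = 0 then 1 else -1)
  if a = 0 ∧ b = 0 then (a, b, max st.2.2 (p.1 - i + 1)) else (a, b, st.2.2)

def maxBalancedSubarray_alt (nums : List Int) : Int :=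
  (PySem.List.pyRange 0 (nums.length : Int) 1).foldl
    (fun ans i =>
      ((PySem.List.enumerate (PySem.List.slice nums (some i) none) i).foldl
        (pvBInner i) (0, 0, ans)).2.2)
    0

-- ===== PRECONDITION & SPEC =====
def Spec_maxBalancedSubarray (nums : List Int) (out : Int) : Prop := out = maxBalancedSubarray_alt nums
instance (nums : List Int) (out : Int) : Decidable (Spec_maxBalancedSubarray nums out) := by unfold Spec_maxBalancedSubarray; infer_instance

-- ===== CLAIM (what is proved, stated in full; the proofs are below) =====
def Claim_equal_maxBalancedSubarray : Prop := ∀ (nums : List Int), Dom_maxBalancedSubarray nums → Spec_maxBalancedSubarray nums (maxBalancedSubarray nums)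

-- ===== LEMMAS AND PROOFS =====

-- the common per-element state update: xor accumulator and parity balance
def pvStep (s : Int × Int) (x : Int) : Int × Int :=
  (PySem.Int.bxor s.1 x, s.2 + (if PySem.Int.mod x 2 = 0 then 1 else -1))

-- prefix state after m elements
def pvPx (nums : List Int) (m : Nat) : Int × Int := (nums.take m).foldl pvStep (0, 0)

-- the list of all n+1 prefix states
def pvPref (nums : List Int) : List (Int × Int) := (List.range (nums.length + 1)).map (pvPx nums)

-- contribution of prefix index j: distance to the first occurrence of its state
def pvContribs (nums : List Int) : List Int :=
  (List.range (nums.length + 1)).map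
    (fun (j : Nat) => (j : Int) - (List.idxOf (pvPx nums j) (pvPref nums) : Int))

def pvBest (nums : List Int) : Int := (pvContribs nums).foldl max 0

-- ---- folded max toolbox ----
theorem pvFmax_le (L : List Int) (a c : Int) :
    L.foldl max a ≤ c ↔ a ≤ c ∧ ∀ x ∈ L, x ≤ c := by
  induction L generalizing a with
  | nil => simp
  | cons y L ih =>
    simp only [List.foldl_cons, ih, List.mem_cons]
    constructor
    · rintro ⟨h1, h2⟩
      exact ⟨le_trans (le_max_left a y) h1,
        fun x hx => hx.elim (fun e => e ▸ le_trans (le_max_right a y) h1) (h2 x)⟩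
    · rintro ⟨h1, h2⟩
      exact ⟨max_le h1 (h2 y (Or.inl rfl)), fun x hx => h2 x (Or.inr hx)⟩

theorem pvLe_fmax_init (L : List Int) (a : Int) : a ≤ L.foldl max a :=
  ((pvFmax_le L a (L.foldl max a)).mp le_rfl).1

theorem pvLe_fmax_mem {L : List Int} {x : Int} (a : Int) (h : x ∈ L) : x ≤ L.foldl max a :=
  ((pvFmax_le L a (L.foldl max a)).mp le_rfl).2 x h

-- ---- bxor structure ----
theorem pvBxor_natCast_negSucc (m n : Nat) :
    PySem.Int.bxor (m : Int) (Int.negSucc n) = Int.negSucc (m ^^^ n) := by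
  rw [PySem.Int.bxor]
  rw [if_pos (by omega), if_neg (by omega)]
  have h1 : (-(Int.negSucc n) - 1).toNat = n := by omega
  have h2 : ((m : Int)).toNat = m := by omega
  rw [h1, h2]
  simp only [Int.negSucc_eq]
  omega

theorem pvBxor_negSucc_natCast (m n : Nat) :
    PySem.Int.bxor (Int.negSucc m) (n : Int) = Int.negSucc (m ^^^ n) := by
  rw [PySem.Int.bxor]
  rw [if_neg (by omega), if_pos (by omega)]
  have h1 : (-(Int.negSucc m) - 1).toNat = m := by omega
  have h2 : ((n : Int)).toNat = n := by omega
  rw [h1, h2]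
  simp only [Int.negSucc_eq]
  omega

theorem pvBxor_negSucc_negSucc (m n : Nat) :
    PySem.Int.bxor (Int.negSucc m) (Int.negSucc n) = ((m ^^^ n : Nat) : Int) := by
  rw [PySem.Int.bxor]
  rw [if_neg (by omega), if_neg (by omega)]
  have h1 : (-(Int.negSucc m) - 1).toNat = m := by omega
  have h2 : (-(Int.negSucc n) - 1).toNat = n := by omega
  rw [h1, h2]

theorem pvBxor_assoc (a b c : Int) :
    PySem.Int.bxor (PySem.Int.bxor a b) c = PySem.Int.bxor a (PySem.Int.bxor b c) := by
  cases a <;> cases b <;> cases c <;>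
    simp only [Int.ofNat_eq_natCast, PySem.Int.bxor_natCast, pvBxor_natCast_negSucc,
      pvBxor_negSucc_natCast, pvBxor_negSucc_negSucc, Nat.xor_assoc]

theorem pvNatXor_eq_left {m n : Nat} : m ^^^ n = m ↔ n = 0 := by
  constructor
  · intro h
    calc n = (m ^^^ m) ^^^ n := by rw [Nat.xor_self, Nat.zero_xor]
    _ = m ^^^ (m ^^^ n) := by rw [Nat.xor_assoc]
    _ = m ^^^ m := by rw [h]
    _ = 0 := Nat.xor_self m
  · rintro rfl; exact Nat.xor_zero m

theorem pvBxor_eq_left {a c : Int} : PySem.Int.bxor a c = a ↔ c = 0 := by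
  cases a with
  | ofNat m =>
    cases c with
    | ofNat n =>
      simp only [Int.ofNat_eq_natCast, PySem.Int.bxor_natCast, Nat.cast_inj, Nat.cast_eq_zero]
      exact pvNatXor_eq_left
    | negSucc n =>
      simp only [Int.ofNat_eq_natCast]
      rw [pvBxor_natCast_negSucc]
      constructor <;> intro h <;> exfalso <;> rw [Int.negSucc_eq] at h <;> omega
  | negSucc m =>
    cases c with
    | ofNat n =>
      simp only [Int.ofNat_eq_natCast, pvBxor_negSucc_natCast, Int.negSucc_inj, Nat.cast_eq_zero]
      exact pvNatXor_eq_left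
    | negSucc n =>
      rw [pvBxor_negSucc_negSucc]
      constructor
      · intro h
        have h0 := Int.natCast_nonneg (m ^^^ n)
        rw [h, Int.negSucc_eq] at h0
        exfalso; omega
      · intro h
        rw [Int.negSucc_eq] at h
        exfalso; omega

theorem pvBxor_zero_left (x : Int) : PySem.Int.bxor 0 x = x := by
  rw [PySem.Int.bxor_comm, PySem.Int.bxor_zero]

-- ---- trajectory of pvStep ----
theorem pvFoldl_step_shift (L : List Int) (a b : Int) :
    L.foldl pvStep (a, b) =
      (PySem.Int.bxor a (L.foldl pvStep (0, 0)).1, b + (L.foldl pvStep (0, 0)).2) := by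
  induction L generalizing a b with
  | nil => simp [PySem.Int.bxor_zero]
  | cons x L ih =>
    simp only [List.foldl_cons, pvStep]
    rw [ih (PySem.Int.bxor a x), ih (PySem.Int.bxor 0 x)]
    rw [pvBxor_zero_left, pvBxor_assoc]
    refine Prod.ext rfl ?_
    simp only
    ring

theorem pvFoldl_step_fixed (L : List Int) (s : Int × Int) :
    L.foldl pvStep s = s ↔ L.foldl pvStep (0, 0) = (0, 0) := by
  obtain ⟨a, b⟩ := s
  rw [pvFoldl_step_shift, Prod.ext_iff, Prod.ext_iff]
  simp only [pvBxor_eq_left]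
  omega

theorem pvPx_split (nums : List Int) (m t : Nat) :
    pvPx nums (m + t) = ((nums.drop m).take t).foldl pvStep (pvPx nums m) := by
  unfold pvPx
  rw [List.take_add, List.foldl_append]

theorem pvPx_append_le (nums : List Int) (x : Int) (m : Nat) (h : m ≤ nums.length) :
    pvPx (nums ++ [x]) m = pvPx nums m := by
  unfold pvPx
  rw [List.take_append_of_le_length h]

theorem pvPx_concat_last (nums : List Int) (x : Int) :
    pvPx (nums ++ [x]) (nums.length + 1) = pvStep (pvPx nums nums.length) x := by
  unfold pvPx
  rw [List.take_of_length_le (by simp), List.take_of_length_le (by simp), List.foldl_append]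
  rfl

theorem pvPref_length (nums : List Int) : (pvPref nums).length = nums.length + 1 := by
  simp [pvPref]

theorem pvPref_getElem (nums : List Int) (j : Nat) (h : j < (pvPref nums).length) :
    (pvPref nums)[j] = pvPx nums j := by
  simp [pvPref]

theorem pvPx_mem_pref (nums : List Int) (j : Nat) (h : j ≤ nums.length) :
    pvPx nums j ∈ pvPref nums := by
  rw [pvPref, List.mem_map]
  exact ⟨j, by rw [List.mem_range]; omega, rfl⟩

theorem pvIdxOf_getElem_le {α : Type} [BEq α] [LawfulBEq α] :
    ∀ (l : List α) (m : Nat) (h : m < l.length), l.idxOf l[m] ≤ m := by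
  intro l
  induction l with
  | nil => intro m h; simp at h
  | cons a l ih =>
    intro m h
    cases m with
    | zero => simp
    | succ m =>
      simp only [List.getElem_cons_succ, List.idxOf_cons, Bool.cond_eq_ite]
      split
      · omega
      · have := ih m (by simpa using h)
        omega

-- ---- append recurrences for pref / contribs / best ----
theorem pvPref_concat (nums : List Int) (x : Int) :
    pvPref (nums ++ [x]) = pvPref nums ++ [pvPx (nums ++ [x]) (nums.length + 1)] := by
  unfold pvPref
  rw [List.length_append, List.length_singleton, List.range_succ, List.map_append]
  congr 1
  apply List.map_congr_left
  intro j hj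
  rw [List.mem_range] at hj
  exact pvPx_append_le nums x j (by omega)

theorem pvContribs_concat (nums : List Int) (x : Int) :
    pvContribs (nums ++ [x]) =
      pvContribs nums ++
        [((nums.length : Int) + 1) -
          (List.idxOf (pvPx (nums ++ [x]) (nums.length + 1)) (pvPref (nums ++ [x])) : Int)] := by
  unfold pvContribs
  rw [List.length_append, List.length_singleton, List.range_succ, List.map_append]
  congr 1
  · apply List.map_congr_left
    intro j hj
    rw [List.mem_range] at hj
    have h1 : pvPx (nums ++ [x]) j = pvPx nums j := pvPx_append_le nums x j (by omega)
    rw [h1, pvPref_concat, List.idxOf_append_of_mem (pvPx_mem_pref nums j (by omega))]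

theorem pvBest_nonneg (nums : List Int) : 0 ≤ pvBest nums := pvLe_fmax_init _ 0

theorem pvFmax_concat (L : List Int) (a y : Int) :
    (L ++ [y]).foldl max a = max (L.foldl max a) y := by
  rw [List.foldl_append]; rfl

theorem pvBest_concat (nums : List Int) (x : Int) :
    pvBest (nums ++ [x]) = max (pvBest nums)
      (((nums.length : Int) + 1) -
        (List.idxOf (pvPx (nums ++ [x]) (nums.length + 1)) (pvPref (nums ++ [x])) : Int)) := by
  rw [pvBest, pvContribs_concat, pvFmax_concat]
  rfl

-- ---- A's invariant ----
theorem pvA_inv (nums : List Int) :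
    (((PySem.List.enumerate nums 0).foldl pvAStep
        (PySem.Dict.empty.insert (0, 0) (-1), 0, 0, 0)).2.1,
     ((PySem.List.enumerate nums 0).foldl pvAStep
        (PySem.Dict.empty.insert (0, 0) (-1), 0, 0, 0)).2.2.1) = pvPx nums nums.length
    ∧ (∀ v : Int × Int,
        ((PySem.List.enumerate nums 0).foldl pvAStep
          (PySem.Dict.empty.insert (0, 0) (-1), 0, 0, 0)).1.get? v =
          if v ∈ pvPref nums then some ((List.idxOf v (pvPref nums) : Int) - 1) else none)
    ∧ ((PySem.List.enumerate nums 0).foldl pvAStep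
        (PySem.Dict.empty.insert (0, 0) (-1), 0, 0, 0)).2.2.2 = pvBest nums := by
  induction nums using List.reverseRecOn with
  | nil =>
    refine ⟨rfl, ?_, by decide⟩
    intro v
    rw [PySem.List.enumerate_nil]
    by_cases hv : v = (0, 0) <;>
      simp [hv, PySem.Dict.get?_insert, PySem.Dict.get?_empty, pvPref, pvPx]
  | append_singleton l x ih =>
    obtain ⟨ih1, ih2, ih3⟩ := ih
    have hfold : (PySem.List.enumerate (l ++ [x]) 0).foldl pvAStep
        (PySem.Dict.empty.insert (0, 0) (-1), 0, 0, 0)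
        = pvAStep ((PySem.List.enumerate l 0).foldl pvAStep
            (PySem.Dict.empty.insert (0, 0) (-1), 0, 0, 0)) ((l.length : Int), x) := by
      rw [PySem.List.enumerate_append, List.foldl_append, PySem.List.enumerate_cons,
        PySem.List.enumerate_nil]
      simp
    set st := (PySem.List.enumerate l 0).foldl pvAStep
      (PySem.Dict.empty.insert (0, 0) (-1), 0, 0, 0) with hst
    set A' := PySem.Int.bxor st.2.1 x with hA
    set B' := st.2.2.1 + (if PySem.Int.mod x 2 = 0 then (1 : Int) else -1) with hB
    have hv : (A', B') = pvPx (l ++ [x]) (l.length + 1) := by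
      rw [pvPx_concat_last, ← ih1]; rfl
    have hstep : pvAStep st ((l.length : Int), x)
        = if st.1.contains (A', B') then
            (st.1, A', B', max st.2.2.2 ((l.length : Int) - st.1.getD (A', B') 0))
          else (st.1.insert (A', B') (l.length : Int), A', B', st.2.2.2) := rfl
    have hcontains : st.1.contains (A', B') = true ↔ (A', B') ∈ pvPref l := by
      rw [PySem.Dict.contains_eq_isSome_get?, ih2 (A', B')]
      split
      · simp_all
      · simp_all
    rw [hfold, hstep]
    by_cases hc : st.1.contains (A', B') = true
    · rw [if_pos hc]
      have hmem : (A', B') ∈ pvPref l := hcontains.mp hc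
      refine ⟨?_, ?_, ?_⟩
      · simpa [List.length_append] using hv
      · intro w
        simp only
        rw [ih2 w, pvPref_concat]
        by_cases hw : w ∈ pvPref l
        · rw [if_pos hw, if_pos (List.mem_append_left _ hw),
            List.idxOf_append_of_mem hw]
        · rw [if_neg hw, if_neg ?_]
          rw [hv] at hmem
          simp only [List.mem_append, List.mem_singleton]
          rintro (h | h)
          · exact hw h
          · rw [h] at hw; exact hw (hv ▸ hmem)
      · simp only
        rw [ih3]
        have hgd : st.1.getD (A', B') 0 = (List.idxOf (A', B') (pvPref l) : Int) - 1 := by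
          rw [PySem.Dict.getD_eq_get?_getD, ih2 (A', B'), if_pos hmem]
          rfl
        rw [hgd, pvBest_concat, pvPref_concat, ← hv, List.idxOf_append_of_mem hmem]
        have harith : ((l.length : Int) + 1) - (List.idxOf (A', B') (pvPref l) : Int)
            = (l.length : Int) - ((List.idxOf (A', B') (pvPref l) : Int) - 1) := by ring
        rw [harith]
    · rw [if_neg hc]
      have hnmem : (A', B') ∉ pvPref l := fun h => hc (hcontains.mpr h)
      refine ⟨?_, ?_, ?_⟩
      · simpa [List.length_append] using hv
      · intro w
        simp only
        rw [PySem.Dict.get?_insert, ih2 w, pvPref_concat]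
        by_cases hw : w = (A', B')
        · rw [hw, ← hv, if_pos rfl,
            if_pos (List.mem_append_right _ (List.mem_singleton_self _)),
            List.idxOf_append, if_neg hnmem, List.idxOf_cons_self, pvPref_length]
          congr 1
          push_cast
          omega
        · rw [if_neg hw]
          by_cases hwm : w ∈ pvPref l
          · rw [if_pos hwm, if_pos (List.mem_append_left _ hwm),
              List.idxOf_append_of_mem hwm]
          · rw [if_neg hwm, if_neg ?_]
            simp only [List.mem_append, List.mem_singleton]
            rintro (h | h)
            · exact hwm h
            · rw [← hv] at h; exact hw h
      · simp only
        rw [ih3, pvBest_concat]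
        have hidx : List.idxOf (pvPx (l ++ [x]) (l.length + 1)) (pvPref (l ++ [x]))
            = (pvPref l).length := by
          rw [pvPref_concat, ← hv, List.idxOf_append, if_neg hnmem, List.idxOf_cons_self]
          omega
        rw [hidx, pvPref_length]
        have h0 : ((l.length : Int) + 1) - ((l.length + 1 : Nat) : Int) = 0 := by push_cast; ring
        rw [h0]
        exact (max_eq_left (pvBest_nonneg l)).symm

theorem pvA_eq (nums : List Int) : maxBalancedSubarray nums = pvBest nums :=
  (pvA_inv nums).2.2

-- ---- B's characterization ----
def pvHits (i : Int) : Int × Int → Int → List Int → List Int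
  | _, _, [] => []
  | s, j, x :: L =>
      (if pvStep s x = (0, 0) then [j - i + 1] else []) ++ pvHits i (pvStep s x) (j + 1) L

theorem pvInner_eq (i : Int) :
    ∀ (L : List Int) (s : Int × Int) (j ans : Int),
      ((PySem.List.enumerate L j).foldl (pvBInner i) (s.1, s.2, ans)).2.2 =
        (pvHits i s j L).foldl max ans := by
  intro L
  induction L with
  | nil => intro s j ans; simp [PySem.List.enumerate_nil, pvHits]
  | cons x L ih =>
    intro s j ans
    rw [PySem.List.enumerate_cons, List.foldl_cons]
    have hb : pvBInner i (s.1, s.2, ans) (j, x)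
        = if pvStep s x = (0, 0) then ((pvStep s x).1, (pvStep s x).2, max ans (j - i + 1))
          else ((pvStep s x).1, (pvStep s x).2, ans) := by
      obtain ⟨sa, sb⟩ := s
      simp [pvBInner, pvStep, Prod.ext_iff]
    rw [hb]
    split_ifs with h
    · rw [ih (pvStep s x) (j + 1) (max ans (j - i + 1))]
      rw [pvHits, if_pos h]
      rfl
    · rw [ih (pvStep s x) (j + 1) ans]
      rw [pvHits, if_neg h]
      rfl

theorem pvOuter_eq (H : Int → List Int) :
    ∀ (R : List Int) (a : Int),
      R.foldl (fun ans i => (H i).foldl max ans) a = (R.flatMap H).foldl max a := by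
  intro R
  induction R with
  | nil => intro a; simp
  | cons i R ih =>
    intro a
    rw [List.foldl_cons, List.flatMap_cons, List.foldl_append, ih]

def pvPairList (nums : List Int) : List Int :=
  (PySem.List.pyRange 0 (nums.length : Int) 1).flatMap
    (fun i => pvHits i (0, 0) i (PySem.List.slice nums (some i) none))

theorem pvB_eq (nums : List Int) :
    maxBalancedSubarray_alt nums = (pvPairList nums).foldl max 0 := by
  unfold maxBalancedSubarray_alt pvPairList
  rw [← pvOuter_eq]
  apply PySem.List.foldl_congr_mem
  intro ans i _
  exact pvInner_eq i (PySem.List.slice nums (some i) none) (0, 0) i ans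

theorem pvMem_hits (i : Int) :
    ∀ (L : List Int) (s : Int × Int) (j x : Int),
      x ∈ pvHits i s j L ↔
        ∃ k : Nat, k < L.length ∧ (L.take (k + 1)).foldl pvStep s = (0, 0) ∧
          x = j + (k : Int) - i + 1 := by
  intro L
  induction L with
  | nil => intro s j x; simp [pvHits]
  | cons y L ih =>
    intro s j x
    rw [pvHits, List.mem_append]
    constructor
    · rintro (h | h)
      · split_ifs at h with hc
        · rw [List.mem_singleton] at h
          exact ⟨0, by simp, by simpa using hc, by rw [h]; push_cast; ring⟩
        · simp at h
      · obtain ⟨k, hk, hcond, hx⟩ := (ih (pvStep s y) (j + 1) x).mp h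
        refine ⟨k + 1, by simp; omega, ?_, by rw [hx]; push_cast; ring⟩
        simpa using hcond
    · rintro ⟨k, hk, hcond, hx⟩
      cases k with
      | zero =>
        left
        have hc : pvStep s y = (0, 0) := by simpa using hcond
        rw [if_pos hc, List.mem_singleton]
        rw [hx]; push_cast; ring
      | succ k =>
        right
        refine (ih (pvStep s y) (j + 1) x).mpr ⟨k, by simp at hk; omega, ?_, by rw [hx]; push_cast; ring⟩
        simpa using hcond

theorem pvMem_pairList (nums : List Int) (x : Int) :
    x ∈ pvPairList nums ↔
      ∃ m jn : Nat, m < jn ∧ jn ≤ nums.length ∧ pvPx nums jn = pvPx nums m ∧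
        x = (jn : Int) - (m : Int) := by
  unfold pvPairList
  rw [List.mem_flatMap]
  constructor
  · rintro ⟨i, hiR, hx⟩
    rw [PySem.List.mem_pyRange_one] at hiR
    obtain ⟨h0, hn⟩ := hiR
    rw [PySem.List.slice_from _ h0] at hx
    obtain ⟨k, hk, hcond, hxv⟩ := (pvMem_hits i _ (0, 0) i x).mp hx
    rw [List.length_drop] at hk
    have hi : ((i.toNat : Nat) : Int) = i := Int.toNat_of_nonneg h0
    refine ⟨i.toNat, i.toNat + (k + 1), by omega, by omega, ?_, by omega⟩
    rw [pvPx_split]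
    exact (pvFoldl_step_fixed _ _).mpr hcond
  · rintro ⟨m, jn, hmj, hjn, heq, hx⟩
    refine ⟨(m : Int), ?_, ?_⟩
    · rw [PySem.List.mem_pyRange_one]
      constructor
      · positivity
      · have hlm : m < nums.length := by omega
        exact_mod_cast hlm
    · rw [PySem.List.slice_from _ (by positivity)]
      refine (pvMem_hits _ _ _ _ _).mpr ⟨jn - m - 1, ?_, ?_, ?_⟩
      · rw [List.length_drop, Int.toNat_natCast]; omega
      · rw [Int.toNat_natCast]
        have h1 : jn - m - 1 + 1 = jn - m := by omega
        rw [h1]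
        apply (pvFoldl_step_fixed _ _).mp
        rw [← pvPx_split]
        have h2 : m + (jn - m) = jn := by omega
        rw [h2, heq]
      · omega

-- ===== VERDICT (by name: the statement is the Claim_ definition above) =====
theorem maxBalancedSubarray_spec : Claim_equal_maxBalancedSubarray := by
  intro nums _
  unfold Spec_maxBalancedSubarray
  rw [pvA_eq, pvB_eq]
  apply le_antisymm
  · rw [pvBest]
    refine (pvFmax_le _ _ _).mpr ⟨pvLe_fmax_init _ _, ?_⟩
    intro c hc
    rw [pvContribs, List.mem_map] at hc
    obtain ⟨j, hj, rfl⟩ := hc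
    rw [List.mem_range] at hj
    have hmem : pvPx nums j ∈ pvPref nums := pvPx_mem_pref nums j (by omega)
    have hmlt : List.idxOf (pvPx nums j) (pvPref nums) < (pvPref nums).length :=
      List.idxOf_lt_length_iff.mpr hmem
    have hPm : (pvPref nums)[List.idxOf (pvPx nums j) (pvPref nums)]'hmlt = pvPx nums j :=
      List.getElem_idxOf hmlt
    have hmj : List.idxOf (pvPx nums j) (pvPref nums) ≤ j := by
      have h1 := pvIdxOf_getElem_le (pvPref nums) j (by rw [pvPref_length]; omega)
      rw [pvPref_getElem nums j (by rw [pvPref_length]; omega)] at h1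
      exact h1
    rcases eq_or_lt_of_le hmj with heq | hlt
    · have h0 : (j : Int) - (List.idxOf (pvPx nums j) (pvPref nums) : Int) = 0 := by omega
      rw [h0]
      exact pvLe_fmax_init _ 0
    · have hpx : pvPx nums (List.idxOf (pvPx nums j) (pvPref nums)) = pvPx nums j :=
        (pvPref_getElem nums _ hmlt).symm.trans hPm
      exact pvLe_fmax_mem 0 ((pvMem_pairList nums _).mpr
        ⟨List.idxOf (pvPx nums j) (pvPref nums), j, hlt, by omega, hpx.symm, rfl⟩)
  · refine (pvFmax_le _ _ _).mpr ⟨pvBest_nonneg nums, ?_⟩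
    intro x hx
    obtain ⟨m, jn, hmj, hjn, heq, rfl⟩ := (pvMem_pairList nums x).mp hx
    have hc : ((jn : Int) - (List.idxOf (pvPx nums jn) (pvPref nums) : Int)) ∈ pvContribs nums := by
      rw [pvContribs, List.mem_map]
      exact ⟨jn, by rw [List.mem_range]; omega, rfl⟩
    have hidx : List.idxOf (pvPx nums jn) (pvPref nums) ≤ m := by
      have h1 := pvIdxOf_getElem_le (pvPref nums) m (by rw [pvPref_length]; omega)
      rw [pvPref_getElem nums m (by rw [pvPref_length]; omega)] at h1
      rw [heq]
      exact h1
    have h2 := pvLe_fmax_mem (L := pvContribs nums) 0 hc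
    rw [pvBest]
    omega
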